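-- pv_equiv track=rewrite | github.com/breezemit/walle-python | walle/cli/batch.py | merge_categorized_notes
-- ===== SOURCE A (Python) =====
-- from collections import defaultdict
--
-- def merge_categorized_notes(all_project_notes, product_name=None):
--     """Merge categorized notes from multiple projects.
--
--     Args:
--         all_project_notes: List of (project_name, categorized_notes) tuples
--         product_name: Name of the product (optional)
--
--     Returns:
--         Merged markdown string
--     """
--     merged = defaultdict(list)
--
--     # Merge all categories from all projects
--     for project_name, notes in all_project_notes:
--         for category, items in notes.items():
--             merged[category].extend(items)
--
--     # Generate markdown
--     category_headers = {
--         'bug_fixes': '**Bug Fixes:**',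
--         'new_features': '_New Features:_',
--         'changes': '_Changes:_',
--         'documentation': 'Documentation:',
--         'other': 'Other:'
--     }
--
--     category_order = ['bug_fixes', 'new_features', 'changes', 'documentation', 'other']
--
--     sections = []
--     if product_name:
--         sections.append(f"# {product_name} Release Notes\n")
--
--     for category in category_order:
--         if category in merged and merged[category]:
--             sections.append(f"{category_headers[category]}")
--             for item in merged[category]:
--                 sections.append(f"- {item}")
--             sections.append("")  # Empty line after each category
--
--     return '\n'.join(sections)
-- ===== SOURCE B (Python) =====
-- def merge_categorized_notes(all_project_notes, product_name=None):
--     """Merge categorized notes from multiple projects into a markdown string.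
--
--     Single category-driven pass: no intermediate merged dict."""
--     headers = [
--         ('bug_fixes', '**Bug Fixes:**'),
--         ('new_features', '_New Features:_'),
--         ('changes', '_Changes:_'),
--         ('documentation', 'Documentation:'),
--         ('other', 'Other:'),
--     ]
--     lines = []
--     if product_name:
--         lines.append(f"# {product_name} Release Notes\n")
--     for category, header in headers:
--         items = [item for _, notes in all_project_notes for item in notes.get(category, [])]
--         if items:
--             lines.append(header)
--             lines.extend(f"- {item}" for item in items)
--             lines.append("")
--     return '\n'.join(lines)
-- ===== Notes on version B (the rewrite author's own statement) =====
-- stated objective: simpler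
-- what changed: Removes the defaultdict merge pass entirely: a single category-driven loop gathers each category's items across projects with a comprehension and emits its section directly, instead of building a merged table first and then walking it.
import Mathlib
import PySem

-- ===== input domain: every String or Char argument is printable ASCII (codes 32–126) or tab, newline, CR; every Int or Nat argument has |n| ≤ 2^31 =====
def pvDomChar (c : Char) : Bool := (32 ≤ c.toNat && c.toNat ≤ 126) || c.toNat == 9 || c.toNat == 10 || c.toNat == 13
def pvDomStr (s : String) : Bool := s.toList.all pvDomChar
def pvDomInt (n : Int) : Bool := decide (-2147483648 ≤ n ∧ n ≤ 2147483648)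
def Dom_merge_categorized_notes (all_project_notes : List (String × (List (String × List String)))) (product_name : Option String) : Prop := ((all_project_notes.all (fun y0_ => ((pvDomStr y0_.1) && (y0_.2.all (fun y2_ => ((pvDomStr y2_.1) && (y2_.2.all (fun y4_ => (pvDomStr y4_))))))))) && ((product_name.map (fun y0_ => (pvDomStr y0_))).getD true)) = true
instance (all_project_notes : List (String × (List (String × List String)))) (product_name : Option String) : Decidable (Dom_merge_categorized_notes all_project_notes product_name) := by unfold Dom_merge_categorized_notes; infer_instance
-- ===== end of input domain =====

-- B replaces A's two-pass "merge into a defaultdict, then walk the category order"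
-- with a single category-driven pass gathering each category's items across the
-- projects directly (objective: simpler; same return value).

-- ===== PORT A =====
def merge_categorized_notes (all_project_notes : List (String × (List (String × List String)))) (product_name : Option String) : String :=
  -- merged = defaultdict(list); for project: for category, items in notes.items(): merged[category].extend(items)
  let merged : PySem.Dict String (List String) :=
    all_project_notes.foldl
      (fun m pr =>
        (PySem.Dict.ofList pr.2).items.foldl
          (fun m ci => m.modify ci.1 [] (fun v => v ++ ci.2)) m)
      PySem.Dict.empty
  let category_headers : PySem.Dict String String :=
    PySem.Dict.ofList [("bug_fixes", "**Bug Fixes:**"), ("new_features", "_New Features:_"),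
      ("changes", "_Changes:_"), ("documentation", "Documentation:"), ("other", "Other:")]
  let category_order : List String := ["bug_fixes", "new_features", "changes", "documentation", "other"]
  let sections0 : List String :=
    match product_name with
    | none => []
    | some s => if s = "" then [] else ["# " ++ s ++ " Release Notes\n"]
  let sections : List String :=
    category_order.foldl
      (fun secs c =>
        if merged.contains c = true ∧ merged.getD c [] ≠ [] then
          ((merged.getD c []).foldl (fun s it => s ++ ["- " ++ it])
            (secs ++ [category_headers.getD c ""])) ++ [""]
        else secs)
      sections0
  PySem.Str.join "\n" sections

-- ===== PORT B =====
def merge_categorized_notes_alt (all_project_notes : List (String × (List (String × List String)))) (product_name : Option String) : String :=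
  let headers : List (String × String) :=
    [("bug_fixes", "**Bug Fixes:**"), ("new_features", "_New Features:_"),
     ("changes", "_Changes:_"), ("documentation", "Documentation:"), ("other", "Other:")]
  let base : List String :=
    match product_name with
    | none => []
    | some s => if s = "" then [] else ["# " ++ s ++ " Release Notes\n"]
  let lines : List String :=
    headers.foldl
      (fun ls ch =>
        let items := all_project_notes.flatMap (fun pr => (PySem.Dict.ofList pr.2).getD ch.1 [])
        if items = [] then ls
        else ls ++ [ch.2] ++ items.map (fun it => "- " ++ it) ++ [""])
      base
  PySem.Str.join "\n" lines

-- ===== PRECONDITION & SPEC =====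
def Spec_merge_categorized_notes (all_project_notes : List (String × (List (String × List String)))) (product_name : Option String) (out : String) : Prop := out = merge_categorized_notes_alt all_project_notes product_name
instance (all_project_notes : List (String × (List (String × List String)))) (product_name : Option String) (out : String) : Decidable (Spec_merge_categorized_notes all_project_notes product_name out) := by unfold Spec_merge_categorized_notes; infer_instance

-- ===== CLAIM (what is proved, stated in full; the proofs are below) =====
def Claim_equal_merge_categorized_notes : Prop := ∀ (all_project_notes : List (String × (List (String × List String)))) (product_name : Option String), Dom_merge_categorized_notes all_project_notes product_name → Spec_merge_categorized_notes all_project_notes product_name (merge_categorized_notes all_project_notes product_name)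

-- ===== LEMMAS AND PROOFS =====

-- items gathered for one category across all projects (B's comprehension)
def pvItemsFor (all_project_notes : List (String × (List (String × List String)))) (c : String) : List String :=
  all_project_notes.flatMap (fun pr => (PySem.Dict.ofList pr.2).getD c [])

theorem pv_flatIf_nil (c : String) (L : List (String × List String))
    (h : ∀ p ∈ L, p.1 ≠ c) :
    L.flatMap (fun ci => if ci.1 = c then ci.2 else []) = [] := by
  induction L with
  | nil => rfl
  | cons p rest ih =>
    simp only [List.flatMap_cons]
    rw [if_neg (h p (by simp)), ih (fun q hq => h q (by simp [hq]))]
    rfl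

theorem pv_flatIf_of_mem (c : String) (v : List String) (L : List (String × List String))
    (hnd : (L.map Prod.fst).Nodup) (hm : (c, v) ∈ L) :
    L.flatMap (fun ci => if ci.1 = c then ci.2 else []) = v := by
  induction L with
  | nil => cases hm
  | cons p rest ih =>
    simp only [List.map_cons, List.nodup_cons] at hnd
    simp only [List.flatMap_cons]
    rcases List.mem_cons.mp hm with h1 | h2
    · subst h1
      rw [if_pos rfl, pv_flatIf_nil c rest (by
        intro q hq hqc
        exact hnd.1 (by simpa [hqc] using List.mem_map_of_mem (f := Prod.fst) hq))]
      simp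
    · have hpc : p.1 ≠ c := by
        intro hpc
        exact hnd.1 (by simpa [hpc] using List.mem_map_of_mem (f := Prod.fst) h2)
      rw [if_neg hpc, ih hnd.2 h2]
      simp

theorem pv_dict_flatIf (d : PySem.Dict String (List String)) (hnd : d.keys.Nodup) (c : String) :
    d.items.flatMap (fun ci => if ci.1 = c then ci.2 else []) = d.getD c [] := by
  cases h : d.get? c with
  | none =>
    rw [PySem.Dict.getD_of_get?_eq_none d [] h]
    apply pv_flatIf_nil
    intro p hp hpc
    have : c ∈ d.keys := by
      simpa [PySem.Dict.keys, hpc] using List.mem_map_of_mem (f := Prod.fst) hp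
    exact ((PySem.Dict.get?_eq_none_iff_not_mem_keys d c).mp h) this
  | some v =>
    rw [PySem.Dict.getD_of_get?_eq_some d [] h]
    exact pv_flatIf_of_mem c v d.items (by simpa [PySem.Dict.keys] using hnd)
      (PySem.Dict.mem_items_of_get?_eq_some d h)

theorem pv_inner_fold (L : List (String × List String)) (m : PySem.Dict String (List String)) (c : String) :
    (L.foldl (fun m ci => m.modify ci.1 [] (fun v => v ++ ci.2)) m).getD c []
      = m.getD c [] ++ L.flatMap (fun ci => if ci.1 = c then ci.2 else []) := by
  induction L generalizing m with
  | nil => simp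
  | cons p rest ih =>
    simp only [List.foldl_cons, List.flatMap_cons]
    rw [ih, PySem.Dict.getD_modify]
    split_ifs with h h2 h2
    · subst h2; simp [List.append_assoc]
    · exact absurd h.symm h2
    · exact absurd h2.symm h
    · simp

theorem pv_merged_getD (apn : List (String × (List (String × List String))))
    (m : PySem.Dict String (List String)) (c : String) :
    (apn.foldl (fun m pr => (PySem.Dict.ofList pr.2).items.foldl
        (fun m ci => m.modify ci.1 [] (fun v => v ++ ci.2)) m) m).getD c []
      = m.getD c [] ++ pvItemsFor apn c := by
  induction apn generalizing m with
  | nil => simp [pvItemsFor]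
  | cons pr rest ih =>
    simp only [List.foldl_cons, pvItemsFor, List.flatMap_cons]
    rw [ih, pv_inner_fold,
      pv_dict_flatIf (PySem.Dict.ofList pr.2) (PySem.Dict.nodup_keys_ofList pr.2) c]
    simp [pvItemsFor, List.append_assoc]

theorem pv_append_fold (l init : List String) :
    l.foldl (fun s it => s ++ ["- " ++ it]) init = init ++ l.map (fun it => "- " ++ it) := by
  induction l generalizing init with
  | nil => simp
  | cons x xs ih => simp [ih, List.append_assoc]

theorem pv_fold_eq (apn : List (String × (List (String × List String))))
    (merged : PySem.Dict String (List String)) (hd : PySem.Dict String String)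
    (hget : ∀ c, merged.getD c [] = pvItemsFor apn c)
    (pairs : List (String × String))
    (hh : ∀ p ∈ pairs, hd.getD p.1 "" = p.2) :
    ∀ secs : List String,
      (pairs.map Prod.fst).foldl
        (fun secs c =>
          if merged.contains c = true ∧ merged.getD c [] ≠ [] then
            ((merged.getD c []).foldl (fun s it => s ++ ["- " ++ it])
              (secs ++ [hd.getD c ""])) ++ [""]
          else secs) secs
      = pairs.foldl
          (fun ls ch =>
            let items := apn.flatMap (fun pr => (PySem.Dict.ofList pr.2).getD ch.1 [])
            if items = [] then ls
            else ls ++ [ch.2] ++ items.map (fun it => "- " ++ it) ++ [""]) secs := by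
  induction pairs with
  | nil => intro secs; rfl
  | cons ch rest ih =>
    intro secs
    simp only [List.map_cons, List.foldl_cons]
    have hitems : (apn.flatMap (fun pr => (PySem.Dict.ofList pr.2).getD ch.1 []))
        = pvItemsFor apn ch.1 := rfl
    have hstep :
        (if merged.contains ch.1 = true ∧ merged.getD ch.1 [] ≠ [] then
          ((merged.getD ch.1 []).foldl (fun s it => s ++ ["- " ++ it])
            (secs ++ [hd.getD ch.1 ""])) ++ [""]
         else secs)
        = (let items := apn.flatMap (fun pr => (PySem.Dict.ofList pr.2).getD ch.1 [])
           if items = [] then secs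
           else secs ++ [ch.2] ++ items.map (fun it => "- " ++ it) ++ [""]) := by
      simp only [hitems, ← hget ch.1]
      by_cases he : merged.getD ch.1 [] = []
      · rw [if_pos he, if_neg]
        rintro ⟨-, hne⟩; exact hne he
      · have hcon : merged.contains ch.1 = true := by
          by_contra hc
          exact he (PySem.Dict.getD_of_not_contains merged [] (by simpa using hc))
        rw [if_neg he, if_pos ⟨hcon, he⟩, pv_append_fold,
          hh ch (by simp), List.append_assoc]
    rw [hstep]
    exact ih (fun p hp => hh p (by simp [hp])) _

-- ===== VERDICT (by name: the statement is the Claim_ definition above) =====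
theorem merge_categorized_notes_spec : Claim_equal_merge_categorized_notes := by
  intro apn pn _
  unfold Spec_merge_categorized_notes merge_categorized_notes merge_categorized_notes_alt
  apply congrArg (PySem.Str.join "\n")
  exact pv_fold_eq apn _ _
    (fun c => by
      rw [pv_merged_getD]
      simp)
    [("bug_fixes", "**Bug Fixes:**"), ("new_features", "_New Features:_"),
     ("changes", "_Changes:_"), ("documentation", "Documentation:"), ("other", "Other:")]
    (by decide) _
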